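-- pv_equiv track=rewrite | github.com/nicwulab/SARS-CoV-2_NTD_DMS | script/check_barcode.py | barcode_permutation
-- ===== SOURCE A (Python) =====
-- import itertools
--
-- def barcode_permutation(nucleotide_3rd):
--   barcode_perms = []
--   for i in nucleotide_3rd:
--     if i == 'K':
--       barcode_perms.append(['G','T'])
--     else:
--       assert i in ['A','C','T','G']
--       barcode_perms.append([i])
--   barcode_list = []
--   for barcode_perm in itertools.product(*barcode_perms):
--     barcode_list.append(''.join(barcode_perm))
--   return barcode_list
-- ===== SOURCE B (Python) =====
-- def barcode_permutation(nucleotide_3rd):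
--   k = 0
--   for i in nucleotide_3rd:
--     if i == 'K':
--       k += 1
--     else:
--       assert i in ['A', 'C', 'T', 'G']
--   result = []
--   for m in range(2 ** k):
--     j = k
--     s = []
--     for i in nucleotide_3rd:
--       if i == 'K':
--         j -= 1
--         s.append('T' if (m >> j) & 1 else 'G')
--       else:
--         s.append(i)
--     result.append(''.join(s))
--   return result
-- ===== Notes on version B (the rewrite author's own statement) =====
-- stated objective: alternative
-- what changed: Instead of building per-position choice lists and taking their Cartesian product with itertools.product, B counts the k degenerate positions and enumerates indices 0..2^k-1, decoding each index's bits (most-significant bit = leftmost degenerate position) into the string in one pass per index.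
import Mathlib
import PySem

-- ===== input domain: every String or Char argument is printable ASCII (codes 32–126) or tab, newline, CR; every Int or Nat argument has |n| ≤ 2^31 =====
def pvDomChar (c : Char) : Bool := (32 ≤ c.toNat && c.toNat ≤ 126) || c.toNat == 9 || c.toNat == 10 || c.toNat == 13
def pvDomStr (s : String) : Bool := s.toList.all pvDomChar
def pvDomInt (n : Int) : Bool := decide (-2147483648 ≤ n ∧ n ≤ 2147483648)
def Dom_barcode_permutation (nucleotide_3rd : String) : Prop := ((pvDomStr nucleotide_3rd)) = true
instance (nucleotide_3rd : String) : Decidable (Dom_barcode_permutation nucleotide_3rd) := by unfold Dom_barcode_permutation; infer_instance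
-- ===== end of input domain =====

-- B enumerates the 2^k expansions by integer index, decoding each index's bits into
-- the K positions, instead of itertools.product over per-position choice lists
-- (alternative algorithm, same cost).


-- ===== PORT A =====
-- first loop of A: per-character choice lists (the assert raises outside Pre_, excluded there)
def pvPermsA (l : List Char) : List (List Char) :=
  l.foldl (fun acc i => acc ++ [if i = 'K' then ['G', 'T'] else [i]]) []

-- itertools.product over a list of choice lists: leftmost position varies slowest
def pvProductA : List (List Char) → List (List Char)
  | [] => [[]]
  | cs :: rest => cs.flatMap (fun c => (pvProductA rest).map (c :: ·))

def barcode_permutation (nucleotide_3rd : String) : List String :=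
  (pvProductA (pvPermsA nucleotide_3rd.toList)).map (fun l => String.ofList l)

-- ===== PORT B =====
-- B's first loop: count the 'K' characters (the assert raises outside Pre_, excluded there)
def pvCountK (l : List Char) : Nat :=
  l.foldl (fun n i => if i = 'K' then n + 1 else n) 0

-- B's inner loop over the characters for one index m: a K consumes the next bit
-- (j is decremented before use, so the bit read is j-1; Python's (m >> j) & 1 on
-- nonnegative ints is exactly m >>> j % 2)
def pvSubstB : List Char → Nat → Nat → List Char
  | [], _, _ => []
  | i :: rest, m, j =>
    if i = 'K' then
      (if (m >>> (j - 1)) % 2 = 1 then 'T' else 'G') :: pvSubstB rest m (j - 1)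
    else
      i :: pvSubstB rest m j

-- B's outer loop: range(2 ** k) over nonnegative ints is exactly List.range (2 ^ k)
def barcode_permutation_alt (nucleotide_3rd : String) : List String :=
  let k := pvCountK nucleotide_3rd.toList
  (List.range (2 ^ k)).map (fun m => String.ofList (pvSubstB nucleotide_3rd.toList m k))

-- ===== PRECONDITION & SPEC =====
-- Pre_ excludes exactly the strings containing a character outside {A,C,T,G,K}, on which both A's and B's assert raises AssertionError.
def Pre_barcode_permutation (nucleotide_3rd : String) : Prop :=
  (nucleotide_3rd.toList.all (fun c => c ∈ (['A', 'C', 'T', 'G', 'K'] : List Char))) = true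
instance (nucleotide_3rd : String) : Decidable (Pre_barcode_permutation nucleotide_3rd) := by
  unfold Pre_barcode_permutation; infer_instance
def pvWitness_barcode_permutation : String := "AKKT"

def Spec_barcode_permutation (nucleotide_3rd : String) (out : List String) : Prop := out = barcode_permutation_alt nucleotide_3rd
instance (nucleotide_3rd : String) (out : List String) : Decidable (Spec_barcode_permutation nucleotide_3rd out) := by unfold Spec_barcode_permutation; infer_instance

-- ===== CLAIM (what is proved, stated in full; the proofs are below) =====
def Claim_equal_barcode_permutation : Prop := ∀ (nucleotide_3rd : String), Dom_barcode_permutation nucleotide_3rd → Pre_barcode_permutation nucleotide_3rd → Spec_barcode_permutation nucleotide_3rd (barcode_permutation nucleotide_3rd)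

-- ===== LEMMAS AND PROOFS =====
theorem pvPermsA_eq_map (l : List Char) :
    pvPermsA l = l.map (fun i => if i = 'K' then ['G', 'T'] else [i]) := by
  unfold pvPermsA
  induction l with
  | nil => rfl
  | cons x xs ih =>
    rw [List.map_cons, ← ih]
    generalize hg : (fun (acc : List (List Char)) (i : Char) =>
      acc ++ [if i = 'K' then ['G', 'T'] else [i]]) = g
    have key : ∀ (ys : List Char) (a : List (List Char)),
        ys.foldl g a = a ++ ys.foldl g [] := by
      intro ys
      induction ys with
      | nil => simp
      | cons y ys ihy =>
        intro a
        simp only [List.foldl_cons]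
        rw [ihy, ihy (g [] y), ← hg]
        simp
    rw [List.foldl_cons, key, ← hg]
    simp

theorem pvCountK_cons (i : Char) (l : List Char) :
    pvCountK (i :: l) = (if i = 'K' then 1 else 0) + pvCountK l := by
  unfold pvCountK
  have key : ∀ (ys : List Char) (a : Nat),
      ys.foldl (fun n i => if i = 'K' then n + 1 else n) a
        = a + ys.foldl (fun n i => if i = 'K' then n + 1 else n) 0 := by
    intro ys
    induction ys with
    | nil => simp
    | cons y ys ihy =>
      intro a
      simp only [List.foldl_cons]
      rw [ihy, ihy (if y = 'K' then 0 + 1 else 0)]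
      split_ifs <;> omega
  rw [List.foldl_cons, key]

-- bit j of 2^c + m equals bit j of m when j < c
theorem bit_add_pow (c j m : Nat) (h : j < c) :
    ((2 ^ c + m) >>> j) % 2 = (m >>> j) % 2 := by
  simp only [Nat.shiftRight_eq_div_pow]
  have hc : 2 ^ c = 2 ^ j * 2 ^ (c - j) := by
    rw [← pow_add]; congr 1; omega
  rw [hc, Nat.mul_add_div (by positivity)]
  have he : 2 ^ (c - j) % 2 = 0 := by
    obtain ⟨d, hd⟩ := Nat.exists_eq_succ_of_ne_zero (show c - j ≠ 0 by omega)
    simp [hd, pow_succ, Nat.mul_mod_left]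
  omega

-- adding a 2^c above all consumed bits does not change the substitution
theorem pvSubstB_add_pow (l : List Char) (c m : Nat) (h : pvCountK l ≤ c) :
    pvSubstB l (2 ^ c + m) (pvCountK l) = pvSubstB l m (pvCountK l) := by
  induction l with
  | nil => rfl
  | cons i rest ih =>
    rw [pvCountK_cons] at *
    by_cases hi : i = 'K'
    · subst hi
      simp only [reduceIte] at h ⊢
      simp only [pvSubstB, reduceIte]
      have h1 : 1 + pvCountK rest - 1 = pvCountK rest := by omega
      rw [h1, bit_add_pow c (pvCountK rest) m (by omega), ih (by omega)]
    · simp only [hi, if_false, zero_add] at h ⊢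
      simp only [pvSubstB, if_neg hi]
      rw [ih h]

-- the heart: A's Cartesian product equals B's bit-indexed enumeration
theorem product_eq_range (l : List Char) :
    pvProductA (l.map (fun i => if i = 'K' then ['G', 'T'] else [i]))
      = (List.range (2 ^ pvCountK l)).map (fun m => pvSubstB l m (pvCountK l)) := by
  induction l with
  | nil => simp [pvProductA, pvCountK, pvSubstB]
  | cons i rest ih =>
    rw [List.map_cons, pvCountK_cons]
    by_cases hi : i = 'K'
    · subst hi
      simp only [reduceIte]
      have hsplit : (2 : Nat) ^ (1 + pvCountK rest)
          = 2 ^ pvCountK rest + 2 ^ pvCountK rest := by ring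
      rw [hsplit, List.range_add, List.map_append, List.map_map]
      show ['G', 'T'].flatMap _ = _
      simp only [List.flatMap_cons, List.flatMap_nil, List.append_nil, ih, List.map_map]
      congr 1
      · -- first half: top bit 0 → 'G'
        apply List.map_congr_left
        intro m hm
        rw [List.mem_range] at hm
        simp only [Function.comp]
        show _ = pvSubstB ('K' :: rest) m (1 + pvCountK rest)
        simp only [pvSubstB, reduceIte]
        have h1 : 1 + pvCountK rest - 1 = pvCountK rest := by omega
        rw [h1]
        have hz : (m >>> pvCountK rest) % 2 = 0 := by
          rw [Nat.shiftRight_eq_div_pow, Nat.div_eq_of_lt hm]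
        rw [hz]
        simp
      · -- second half: m = 2^k + m', top bit 1 → 'T', lower bits unchanged
        apply List.map_congr_left
        intro m hm
        rw [List.mem_range] at hm
        simp only [Function.comp]
        show _ = pvSubstB ('K' :: rest) (2 ^ pvCountK rest + m) (1 + pvCountK rest)
        simp only [pvSubstB, reduceIte]
        have h1 : 1 + pvCountK rest - 1 = pvCountK rest := by omega
        rw [h1]
        have ho : ((2 ^ pvCountK rest + m) >>> pvCountK rest) % 2 = 1 := by
          rw [Nat.shiftRight_eq_div_pow, Nat.add_comm,
            Nat.add_div_right _ (by positivity), Nat.div_eq_of_lt hm]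
        rw [ho, pvSubstB_add_pow rest (pvCountK rest) m (le_refl _)]
        simp
    · simp only [hi, if_false, zero_add]
      show List.flatMap _ [i] = _
      simp only [List.flatMap_cons, List.flatMap_nil, List.append_nil, ih, List.map_map]
      apply List.map_congr_left
      intro m hm
      simp only [Function.comp]
      show _ = pvSubstB (i :: rest) m (pvCountK rest)
      simp [pvSubstB, if_neg hi]

-- ===== VERDICT (by name: the statement is the Claim_ definition above) =====
theorem barcode_permutation_spec : Claim_equal_barcode_permutation := by
  intro s _ _
  unfold Spec_barcode_permutation barcode_permutation barcode_permutation_alt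
  rw [pvPermsA_eq_map, product_eq_range]
  simp [List.map_map, Function.comp]
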